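-- pv_equiv track=rewrite | github.com/frozen-dumplings/algorithm-playground | FANMEETING/chacham3.py | solve
-- ===== SOURCE A (Python) =====
-- def convert(S):
--     b = "".join(["1" if c == 'M' else "0" for c in S])
--     return int(b, 2)
--
-- def solve(MEMBERS, FANS):
--     MEMbits = convert(MEMBERS)
--     FANbits = convert(FANS)
--     res = 0
--     for i in range(len(FANS) - len(MEMBERS) + 1):
--         if MEMbits & (FANbits >> i):
--             continue
--         else:
--             res += 1
--     return res
-- ===== SOURCE B (Python) =====
-- def solve(MEMBERS, FANS):
--     total = len(FANS) - len(MEMBERS) + 1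
--     if total <= 0:
--         return 0
--     P = [j for j, c in enumerate(reversed(MEMBERS)) if c == 'M']
--     Q = [j for j, c in enumerate(reversed(FANS)) if c == 'M']
--     bad = set()
--     for p in P:
--         for q in Q:
--             d = q - p
--             if 0 <= d < total:
--                 bad.add(d)
--     return total - len(bad)
-- ===== Notes on version B (the rewrite author's own statement) =====
-- stated objective: alternative
-- what changed: Instead of testing every shift with a bignum AND (MEMbits & (FANbits >> i)), B collects the set of colliding shifts as differences q - p over the 'M' positions of the two (reversed) strings and returns total - |bad set|, so work scales with the number of 'M' characters rather than with the number of shifts times the string length; on 'M'-dense inputs it is not faster than A's word-parallel bignum loop.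
import Mathlib
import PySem

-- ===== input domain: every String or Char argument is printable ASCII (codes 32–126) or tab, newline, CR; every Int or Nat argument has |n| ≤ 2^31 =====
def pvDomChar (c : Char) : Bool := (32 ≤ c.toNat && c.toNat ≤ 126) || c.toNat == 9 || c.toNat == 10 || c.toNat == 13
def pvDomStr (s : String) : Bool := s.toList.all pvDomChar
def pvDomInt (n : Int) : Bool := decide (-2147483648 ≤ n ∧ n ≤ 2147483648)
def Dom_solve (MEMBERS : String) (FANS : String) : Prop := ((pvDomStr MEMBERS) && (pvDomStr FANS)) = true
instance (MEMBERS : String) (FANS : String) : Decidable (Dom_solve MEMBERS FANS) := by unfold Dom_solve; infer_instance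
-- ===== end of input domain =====

-- B replaces A's per-shift bignum AND-test loop by collecting the set of colliding
-- shifts from the 'M' positions of the two strings (objective: alternative algorithm).


-- ===== PORT A =====
-- convert(S) = int("".join('1' if c == 'M' else '0' for c in S), 2).
-- int(b, 2) is hand-ported: here b is a string of '0'/'1' digits only, on which int(b, 2)
-- is exactly the left fold acc*2+digit (exact on this domain: no sign/whitespace/underscore
-- can occur); int('', 2) raises ValueError → none.
def convert (S : String) : Option Nat :=
  let b := S.toList.map (fun c => if c = 'M' then '1' else '0')
  if b.isEmpty then none
  else some (b.foldl (fun a c => 2 * a + (if c = '1' then 1 else 0)) 0)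

def solve (MEMBERS : String) (FANS : String) : Int :=
  match convert MEMBERS, convert FANS with
  | some MEMbits, some FANbits =>
    (PySem.List.pyRange 0 (PySem.Str.len FANS - PySem.Str.len MEMBERS + 1) 1).foldl
      (fun res i => if MEMbits &&& (FANbits >>> i.toNat) ≠ 0 then res else res + 1) 0
  | _, _ => 0  -- unreachable under Pre_solve (int('', 2) raises ValueError)

-- ===== PORT B =====
-- [j for j, c in enumerate(reversed(S)) if c == 'M']
def mPositions (cs : List Char) : List Int :=
  (PySem.List.enumerate cs 0).filterMap (fun jc => if jc.2 = 'M' then some jc.1 else none)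

def solve_alt (MEMBERS : String) (FANS : String) : Int :=
  let total := PySem.Str.len FANS - PySem.Str.len MEMBERS + 1
  if total ≤ 0 then 0
  else
    let P := mPositions MEMBERS.toList.reverse
    let Q := mPositions FANS.toList.reverse
    let bad := P.foldl (fun s p => Q.foldl (fun s q =>
        if 0 ≤ q - p ∧ q - p < total then PySem.Set.add s (q - p) else s) s)
      (PySem.Set.empty : PySem.Set Int)
    total - PySem.Set.len bad

-- ===== PRECONDITION & SPEC =====
-- Pre_ excludes exactly the inputs on which A raises: int('', 2) (ValueError) is reached
-- as soon as either string is empty.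
def Pre_solve (MEMBERS : String) (FANS : String) : Prop :=
  MEMBERS.toList ≠ [] ∧ FANS.toList ≠ []
instance (MEMBERS : String) (FANS : String) : Decidable (Pre_solve MEMBERS FANS) := by unfold Pre_solve; infer_instance
def pvWitness_solve : String × String := ("M", "MFM")

def Spec_solve (MEMBERS : String) (FANS : String) (out : Int) : Prop := out = solve_alt MEMBERS FANS
instance (MEMBERS : String) (FANS : String) (out : Int) : Decidable (Spec_solve MEMBERS FANS out) := by unfold Spec_solve; infer_instance

-- ===== CLAIM (what is proved, stated in full; the proofs are below) =====
def Claim_equal_solve : Prop := ∀ (MEMBERS : String) (FANS : String), Dom_solve MEMBERS FANS → Pre_solve MEMBERS FANS → Spec_solve MEMBERS FANS (solve MEMBERS FANS)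
-- ===== LEMMAS AND PROOFS =====

-- the numeric value A's convert computes, folded directly over the characters
def nval (cs : List Char) : Nat := cs.foldl (fun a c => 2 * a + (if c = 'M' then 1 else 0)) 0

theorem convert_eq (S : String) (h : ¬ S.toList = []) : convert S = some (nval S.toList) := by
  unfold convert nval
  have hf : (fun (a : Nat) (c : Char) => 2 * a + (if (if c = 'M' then ('1':Char) else '0') = '1' then 1 else 0))
      = (fun (a : Nat) (c : Char) => 2 * a + (if c = 'M' then 1 else 0)) := by
    funext a c; by_cases hc : c = 'M' <;> simp [hc]
  simp [List.foldl_map, hf, List.isEmpty_iff, h]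

theorem testBit_nval (cs : List Char) (j : Nat) :
    (nval cs).testBit j = decide (cs.reverse[j]? = some 'M') := by
  induction cs using List.reverseRecOn generalizing j with
  | nil => simp [nval, Nat.zero_testBit]
  | append_singleton cs c ih =>
    have hstep : nval (cs ++ [c]) = 2 * nval cs + (if c = 'M' then 1 else 0) := by
      simp [nval, List.foldl_append]
    rw [hstep]
    cases j with
    | zero =>
      rw [Nat.testBit_zero]
      by_cases hc : c = 'M' <;> simp [hc, Nat.mul_add_mod]
    | succ j =>
      rw [Nat.testBit_succ]
      have h2 : (2 * nval cs + (if c = 'M' then 1 else 0)) / 2 = nval cs := by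
        by_cases hc : c = 'M' <;> simp [hc] <;> omega
      rw [h2, ih]
      simp

theorem land_ne_zero_iff (a b : Nat) :
    a &&& b ≠ 0 ↔ ∃ j, a.testBit j ∧ b.testBit j := by
  constructor
  · intro h
    by_contra hc
    push_neg at hc
    apply h
    apply Nat.eq_of_testBit_eq
    intro i
    rw [Nat.testBit_land, Nat.zero_testBit]
    have := hc i
    cases ha : a.testBit i <;> cases hb : b.testBit i <;> simp_all
  · rintro ⟨j, hja, hjb⟩ h0
    have := congrArg (fun n => Nat.testBit n j) h0
    simp [Nat.testBit_land, hja, hjb] at this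

theorem hit_iff (M F : List Char) (i : Nat) :
    nval M &&& (nval F >>> i) ≠ 0 ↔
      ∃ j : Nat, M.reverse[j]? = some 'M' ∧ F.reverse[i + j]? = some 'M' := by
  rw [land_ne_zero_iff]
  simp [Nat.testBit_shiftRight, testBit_nval]

theorem mem_mPositions (cs : List Char) (x : Int) :
    x ∈ mPositions cs ↔ ∃ k : Nat, x = (k : Int) ∧ cs[k]? = some 'M' := by
  unfold mPositions
  rw [List.mem_filterMap]
  constructor
  · rintro ⟨⟨j, c⟩, hmem, hf⟩
    rw [PySem.List.mem_enumerate_iff] at hmem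
    obtain ⟨k, hk, hp⟩ := hmem
    simp only [Prod.mk.injEq, zero_add] at hp
    obtain ⟨hj, hc⟩ := hp
    by_cases hM : c = 'M'
    · simp only [hM, if_pos] at hf
      rw [Option.some_inj] at hf
      refine ⟨k, ?_, ?_⟩
      · omega
      · rw [List.getElem?_eq_some_iff]; exact ⟨hk, by rw [← hc, hM]⟩
    · simp [hM] at hf
  · rintro ⟨k, hx, hget⟩
    rw [List.getElem?_eq_some_iff] at hget
    obtain ⟨hk, hM⟩ := hget
    refine ⟨((k : Int), cs[k]), ?_, ?_⟩
    · rw [PySem.List.mem_enumerate_iff]; exact ⟨k, hk, by simp⟩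
    · simp [hM, hx]

theorem mem_inner (Q : List Int) (total p x : Int) (s : PySem.Set Int) :
    x ∈ Q.foldl (fun s q => if 0 ≤ q - p ∧ q - p < total then PySem.Set.add s (q - p) else s) s
      ↔ x ∈ s ∨ ∃ q ∈ Q, (0 ≤ q - p ∧ q - p < total) ∧ x = q - p := by
  induction Q generalizing s with
  | nil => simp
  | cons q Q ih =>
    simp only [List.foldl_cons, List.mem_cons]
    rw [ih]
    by_cases hq : 0 ≤ q - p ∧ q - p < total
    · simp only [if_pos hq, PySem.Set.mem_add]
      constructor
      · rintro (⟨h | h⟩ | h)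
        · exact Or.inl h
        · exact Or.inr ⟨q, Or.inl rfl, hq, h⟩
        · obtain ⟨q', hq', hc, he⟩ := h; exact Or.inr ⟨q', Or.inr hq', hc, he⟩
      · rintro (h | ⟨q', hq', hc, he⟩)
        · exact Or.inl (Or.inl h)
        · rcases hq' with rfl | hq'
          · exact Or.inl (Or.inr he)
          · exact Or.inr ⟨q', hq', hc, he⟩
    · simp only [if_neg hq]
      constructor
      · rintro (h | ⟨q', hq', hc, he⟩)
        · exact Or.inl h
        · exact Or.inr ⟨q', Or.inr hq', hc, he⟩
      · rintro (h | ⟨q', hq', hc, he⟩)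
        · exact Or.inl h
        · rcases hq' with rfl | hq'
          · exact absurd hc hq
          · exact Or.inr ⟨q', hq', hc, he⟩

theorem nodup_inner (Q : List Int) (total p : Int) (s : PySem.Set Int) (hs : s.Nodup) :
    (Q.foldl (fun s q => if 0 ≤ q - p ∧ q - p < total then PySem.Set.add s (q - p) else s) s).Nodup := by
  induction Q generalizing s with
  | nil => exact hs
  | cons q Q ih =>
    simp only [List.foldl_cons]
    apply ih
    by_cases hq : 0 ≤ q - p ∧ q - p < total
    · rw [if_pos hq]; exact PySem.Set.nodup_add s _ hs
    · rw [if_neg hq]; exact hs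

theorem mem_outer (P Q : List Int) (total x : Int) (s : PySem.Set Int) :
    x ∈ P.foldl (fun s p => Q.foldl (fun s q => if 0 ≤ q - p ∧ q - p < total then PySem.Set.add s (q - p) else s) s) s
      ↔ x ∈ s ∨ ∃ p ∈ P, ∃ q ∈ Q, (0 ≤ q - p ∧ q - p < total) ∧ x = q - p := by
  induction P generalizing s with
  | nil => simp
  | cons p P ih =>
    simp only [List.foldl_cons, List.mem_cons]
    rw [ih, mem_inner]
    constructor
    · rintro ((h | h) | h)
      · exact Or.inl h
      · obtain ⟨q, hq, hc, he⟩ := h; exact Or.inr ⟨p, Or.inl rfl, q, hq, hc, he⟩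
      · obtain ⟨p', hp', rest⟩ := h; exact Or.inr ⟨p', Or.inr hp', rest⟩
    · rintro (h | ⟨p', hp', q, hq, hc, he⟩)
      · exact Or.inl (Or.inl h)
      · rcases hp' with rfl | hp'
        · exact Or.inl (Or.inr ⟨q, hq, hc, he⟩)
        · exact Or.inr ⟨p', hp', q, hq, hc, he⟩

theorem nodup_outer (P Q : List Int) (total : Int) (s : PySem.Set Int) (hs : s.Nodup) :
    (P.foldl (fun s p => Q.foldl (fun s q => if 0 ≤ q - p ∧ q - p < total then PySem.Set.add s (q - p) else s) s) s).Nodup := by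
  induction P generalizing s with
  | nil => exact hs
  | cons p P ih =>
    simp only [List.foldl_cons]
    exact ih _ (nodup_inner Q total p s hs)

def condA (M F : List Char) (i : Int) : Bool :=
  decide (nval M &&& (nval F >>> i.toNat) ≠ 0)

theorem foldl_countB (c : Int → Bool) (l : List Int) (r : Int) :
    l.foldl (fun res i => if c i then res else res + 1) r
      = r + (l.countP (fun i => !c i) : Nat) := by
  induction l generalizing r with
  | nil => simp
  | cons x l ih =>
    simp only [List.foldl_cons, List.countP_cons, ih]
    cases hx : c x <;> simp [hx] <;> push_cast <;> ring

theorem main_eq (MEMBERS FANS : String) (hm : ¬ MEMBERS.toList = []) (hf : ¬ FANS.toList = []) :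
    solve MEMBERS FANS = solve_alt MEMBERS FANS := by
  have hA : solve MEMBERS FANS =
      (PySem.List.pyRange 0 ((FANS.toList.length : Int) - MEMBERS.toList.length + 1) 1).foldl
        (fun res i => if condA MEMBERS.toList FANS.toList i then res else res + 1) 0 := by
    have hfn : (fun (res : Int) (i : Int) => if nval MEMBERS.toList &&& (nval FANS.toList >>> i.toNat) ≠ 0 then res else res + 1)
        = (fun (res : Int) (i : Int) => if condA MEMBERS.toList FANS.toList i then res else res + 1) := by
      funext res i
      by_cases hc : nval MEMBERS.toList &&& (nval FANS.toList >>> i.toNat) ≠ 0 <;>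
        simp [hc, condA]
    unfold solve
    rw [convert_eq MEMBERS hm, convert_eq FANS hf, PySem.Str.len_eq, PySem.Str.len_eq]
    show (PySem.List.pyRange 0 ((FANS.toList.length : Int) - MEMBERS.toList.length + 1) 1).foldl
        (fun res i => if nval MEMBERS.toList &&& (nval FANS.toList >>> i.toNat) ≠ 0 then res else res + 1) 0 = _
    rw [hfn]
  set total : Int := (FANS.toList.length : Int) - MEMBERS.toList.length + 1 with htot
  by_cases hle : total ≤ 0
  · rw [hA, PySem.List.pyRange_one_eq_nil hle]
    simp only [solve_alt, PySem.Str.len_eq, ← htot, if_pos hle]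
    simp
  · push_neg at hle
    set R := PySem.List.pyRange 0 total 1 with hR
    set P := mPositions MEMBERS.toList.reverse with hP
    set Q := mPositions FANS.toList.reverse with hQ
    set bad := P.foldl (fun s p => Q.foldl (fun s q =>
        if 0 ≤ q - p ∧ q - p < total then PySem.Set.add s (q - p) else s) s)
      (PySem.Set.empty : PySem.Set Int) with hbad
    have hB : solve_alt MEMBERS FANS = total - (bad.length : Int) := by
      simp only [solve_alt, PySem.Str.len_eq, ← htot, ← hP, ← hQ, ← hbad,
        if_neg (by omega : ¬ total ≤ 0)]
      simp [PySem.Set.len]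
    have badMem : ∀ x : Int, x ∈ bad ↔ x ∈ R ∧ condA MEMBERS.toList FANS.toList x = true := by
      intro x
      rw [hbad, mem_outer]
      have hemp : x ∈ (PySem.Set.empty : PySem.Set Int) ↔ False := by
        simp [PySem.Set.empty]
      rw [hemp]
      simp only [false_or]
      constructor
      · rintro ⟨p, hp, q, hq, ⟨h0, h1⟩, rfl⟩
        obtain ⟨k, rfl, hk⟩ := (mem_mPositions _ _).mp hp
        obtain ⟨k', rfl, hk'⟩ := (mem_mPositions _ _).mp hq
        refine ⟨?_, ?_⟩
        · rw [hR, PySem.List.mem_pyRange_one]; omega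
        · simp only [condA, decide_eq_true_iff]
          rw [hit_iff]
          refine ⟨k, hk, ?_⟩
          have hkk : ((k':Int) - k).toNat + k = k' := by omega
          rw [hkk]; exact hk'
      · rintro ⟨hxR, hc⟩
        rw [hR, PySem.List.mem_pyRange_one] at hxR
        simp only [condA, decide_eq_true_iff] at hc
        rw [hit_iff] at hc
        obtain ⟨j, hj, hj'⟩ := hc
        refine ⟨(j : Int), (mem_mPositions _ _).mpr ⟨j, rfl, hj⟩,
                ((x.toNat + j : Nat) : Int), (mem_mPositions _ _).mpr ⟨x.toNat + j, rfl, hj'⟩, ?_, ?_⟩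
        · push_cast; omega
        · push_cast; omega
    have hnodupR : R.Nodup := PySem.List.nodup_pyRange_one 0 total
    have hnodupbad : bad.Nodup := by
      rw [hbad]; exact nodup_outer P Q total _ (by simp [PySem.Set.empty])
    have hperm : bad.Perm (R.filter (condA MEMBERS.toList FANS.toList)) := by
      rw [List.perm_ext_iff_of_nodup hnodupbad (List.Nodup.filter _ hnodupR)]
      intro a
      rw [badMem a, List.mem_filter]
    have hlen1 : bad.length = R.countP (condA MEMBERS.toList FANS.toList) := by
      rw [hperm.length_eq, List.countP_eq_length_filter]
    have hlen2 : R.length = total.toNat := by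
      rw [hR, PySem.List.length_pyRange_one]; congr 1; omega
    have hsplit := List.length_eq_countP_add_countP (condA MEMBERS.toList FANS.toList) (l := R)
    have hfn2 : (fun a => decide (¬ (condA MEMBERS.toList FANS.toList a) = true))
        = (fun a => !condA MEMBERS.toList FANS.toList a) := by
      funext a; cases condA MEMBERS.toList FANS.toList a <;> simp
    rw [hfn2] at hsplit
    rw [hA, ← hR] at *
    rw [hA, foldl_countB (condA MEMBERS.toList FANS.toList) R 0, hB]
    omega

-- ===== VERDICT (by name: the statement is the Claim_ definition above) =====
theorem solve_spec : Claim_equal_solve := by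
  intro MEMBERS FANS _ hpre
  unfold Spec_solve
  exact main_eq MEMBERS FANS hpre.1 hpre.2
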